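-- pv_equiv track=rewrite | github.com/ayushwanjari1996/test-log-analyser | src/core/chunker.py | _group_nearby_indices
-- ===== SOURCE A (Python) =====
-- from typing import List, Dict, Any, Optional, Tuple
--
-- def _group_nearby_indices(
--
--     indices: List[int],
--     max_distance: int
-- ) -> List[List[int]]:
--     """
--     Group indices that are close together.
--
--     Args:
--         indices: List of indices
--         max_distance: Maximum distance to consider indices as "nearby"
--
--     Returns:
--         List of index groups
--     """
--     if not indices:
--         return []
--
--     sorted_indices = sorted(indices)
--     groups = []
--     current_group = [sorted_indices[0]]
--
--     for idx in sorted_indices[1:]: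
--         if idx - current_group[-1] <= max_distance:
--             current_group.append(idx)
--         else:
--             groups.append(current_group)
--             current_group = [idx]
--
--     groups.append(current_group)
--     return groups
-- ===== SOURCE B (Python) =====
-- def _group_nearby_indices(indices, max_distance):
--     # Staged passes: first compute the cut positions (where the sorted gap
--     # exceeds max_distance), then materialize each group by slicing the
--     # sorted list between consecutive boundaries.
--     if not indices:
--         return []
--     s = sorted(indices)
--     cuts = [i for i in range(1, len(s)) if s[i] - s[i - 1] > max_distance]
--     bounds = [0] + cuts + [len(s)]
--     return [s[a:b] for a, b in zip(bounds, bounds[1:])]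
-- ===== Notes on version B (the rewrite author's own statement) =====
-- stated objective: alternative
-- what changed: B computes the split structure first (the list of boundary indices where the sorted gap exceeds max_distance) and then materializes each group by slicing the sorted list between consecutive boundaries, replacing A's single accumulator loop that appends element by element.
import Mathlib
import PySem

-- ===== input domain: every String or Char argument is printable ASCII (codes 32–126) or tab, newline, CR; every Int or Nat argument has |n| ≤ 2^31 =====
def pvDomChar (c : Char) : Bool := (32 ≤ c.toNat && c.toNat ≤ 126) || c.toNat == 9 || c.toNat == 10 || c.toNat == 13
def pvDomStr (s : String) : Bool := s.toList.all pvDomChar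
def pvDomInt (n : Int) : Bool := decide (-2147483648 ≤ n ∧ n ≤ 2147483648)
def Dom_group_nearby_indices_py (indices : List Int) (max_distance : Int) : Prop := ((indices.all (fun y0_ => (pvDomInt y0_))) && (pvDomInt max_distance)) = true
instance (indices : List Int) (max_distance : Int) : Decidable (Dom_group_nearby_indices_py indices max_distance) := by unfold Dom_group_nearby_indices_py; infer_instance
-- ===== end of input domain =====

-- B computes the cut positions of the sorted list first, then materializes each group as a slice between consecutive boundaries (alternative decomposition; same cost).

-- ===== PORT A =====
-- loop body: append idx to the current group, or close the current group and open a new one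
def stepA (max_distance : Int) (st : List (List Int) × List Int) (idx : Int) : List (List Int) × List Int :=
  if idx - ((PySem.List.pyGet? st.2 (-1)).getD 0) ≤ max_distance then (st.1, st.2 ++ [idx])
  else (st.1 ++ [st.2], [idx])
-- `current_group[-1]` via pyGet? with getD 0: the current group is never empty, so the default is never used

def group_nearby_indices_py (indices : List Int) (max_distance : Int) : List (List Int) :=
  if indices = [] then []
  else
    let sorted_indices := PySem.List.sorted indices (fun x => x) false
    let st := (PySem.List.slice sorted_indices (some 1) none).foldl (stepA max_distance)
                ([], [(PySem.List.pyGet? sorted_indices 0).getD 0])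
    st.1 ++ [st.2]

-- ===== PORT B =====
-- the comprehension `[i for i in range(1, len(s)) if s[i] - s[i-1] > max_distance]`;
-- `s[i]`/`s[i-1]` via pyGet? with getD 0: i ranges over [1, len), so both are in range
def cutsB (max_distance : Int) (s : List Int) : List Int :=
  (PySem.List.pyRange 1 (s.length : Int) 1).filter
    (fun i => decide (max_distance < (PySem.List.pyGet? s i).getD 0 - (PySem.List.pyGet? s (i-1)).getD 0))

def group_nearby_indices_py_alt (indices : List Int) (max_distance : Int) : List (List Int) :=
  if indices = [] then []
  else
    let s := PySem.List.sorted indices (fun x => x) false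
    let bounds := [(0:Int)] ++ cutsB max_distance s ++ [(s.length : Int)]
    (bounds.zip (PySem.List.slice bounds (some 1) none)).map
      (fun p => PySem.List.slice s (some p.1) (some p.2))

-- ===== PRECONDITION & SPEC =====
def Spec_group_nearby_indices_py (indices : List Int) (max_distance : Int) (out : List (List Int)) : Prop := out = group_nearby_indices_py_alt indices max_distance
instance (indices : List Int) (max_distance : Int) (out : List (List Int)) : Decidable (Spec_group_nearby_indices_py indices max_distance out) := by unfold Spec_group_nearby_indices_py; infer_instance

-- ===== CLAIM (what is proved, stated in full; the proofs are below) =====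
def Claim_equal_group_nearby_indices_py : Prop := ∀ (indices : List Int) (max_distance : Int), Dom_group_nearby_indices_py indices max_distance → Spec_group_nearby_indices_py indices max_distance (group_nearby_indices_py indices max_distance)

-- ===== LEMMAS AND PROOFS =====

-- proof-side reference: the grouping as a foldr that prepends to the first group
def altStep (max_distance : Int) (groups : List (List Int)) (idx : Int) : List (List Int) :=
  match groups with
  | [] => [[idx]]
  | g :: gs =>
      if (PySem.List.pyGet? g 0).getD 0 - idx ≤ max_distance then (idx :: g) :: gs
      else [idx] :: g :: gs

-- the first group produced by the reference foldr starts with the head of the list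
lemma foldrB_cons (md x : Int) (xs : List Int) :
    ∃ t gs, ((x :: xs).foldr (fun a g => altStep md g a) []) = (x :: t) :: gs := by
  rw [List.foldr_cons]
  rcases h : xs.foldr (fun a g => altStep md g a) [] with _ | ⟨g, gs⟩
  · exact ⟨[], [], by simp [altStep]⟩
  · by_cases hc : (PySem.List.pyGet? g 0).getD 0 - x ≤ md
    · exact ⟨g, gs, by simp [altStep, hc]⟩
    · exact ⟨[], g :: gs, by simp [altStep, hc]⟩

-- A's accumulator loop, finished with the final append, equals the reference foldr with the
-- pending group (t ++ [lastv]) spliced into the first group of the foldr of (lastv :: xs)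
lemma loop_eq (md : Int) : ∀ (xs : List Int) (groups : List (List Int)) (t : List Int) (lastv : Int),
    (xs.foldl (stepA md) (groups, t ++ [lastv])).1 ++ [(xs.foldl (stepA md) (groups, t ++ [lastv])).2] =
      groups ++ (match (lastv :: xs).foldr (fun a g => altStep md g a) [] with
                 | [] => []
                 | g :: gs => (t ++ g) :: gs) := by
  intro xs
  induction xs with
  | nil => intro groups t lastv; simp [altStep]
  | cons y ys ih =>
      intro groups t lastv
      obtain ⟨t', gs', h'⟩ := foldrB_cons md y ys
      have hlast : PySem.List.pyGet? (t ++ [lastv]) (-1) = some lastv :=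
        PySem.List.pyGet?_neg_one_append_singleton t lastv
      by_cases hc : y - lastv ≤ md
      · have hstep : stepA md (groups, t ++ [lastv]) y = (groups, (t ++ [lastv]) ++ [y]) := by
          simp [stepA, hlast, hc]
        rw [List.foldl_cons, hstep, ih groups (t ++ [lastv]) y, h']
        have : (lastv :: y :: ys).foldr (fun a g => altStep md g a) [] =
            (lastv :: y :: t') :: gs' := by
          rw [List.foldr_cons, h']
          simp [altStep, hc]
        rw [this]
        simp
      · have hstep : stepA md (groups, t ++ [lastv]) y = (groups ++ [t ++ [lastv]], [y]) := by
          simp [stepA, hlast, hc]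
        have h0 : ([] : List Int) ++ [y] = [y] := rfl
        rw [List.foldl_cons, hstep, ← h0, ih (groups ++ [t ++ [lastv]]) [] y, h']
        have : (lastv :: y :: ys).foldr (fun a g => altStep md g a) [] =
            [lastv] :: (y :: t') :: gs' := by
          rw [List.foldr_cons, h']
          simp [altStep, hc]
        rw [this]
        simp

-- B-side proof helper: bounds-and-slices, with bounds[1:] written as .tail
def slicesOf (md : Int) (l : List Int) : List (List Int) :=
  let bs := (0 : Int) :: cutsB md l ++ [(l.length : Int)]
  (bs.zip bs.tail).map (fun p => PySem.List.slice l (some p.1) (some p.2))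

lemma pyGet?_cons_shift (x : Int) (xs : List Int) (i : Int) (h : 0 ≤ i) :
    PySem.List.pyGet? (x :: xs) (i + 1) = PySem.List.pyGet? xs i := by
  rw [PySem.List.pyGet?_of_nonneg _ (by omega), PySem.List.pyGet?_of_nonneg _ h]
  have : (i + 1).toNat = i.toNat + 1 := by omega
  simp [this]

lemma slice_cons_shift (x : Int) (xs : List Int) (a b : Int) (ha : 0 ≤ a) (hb : 0 ≤ b) :
    PySem.List.slice (x :: xs) (some (a + 1)) (some (b + 1)) = PySem.List.slice xs (some a) (some b) := by
  rw [PySem.List.slice_toNat _ (by omega) (by omega), PySem.List.slice_toNat _ ha hb]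
  have h1 : (a + 1).toNat = a.toNat + 1 := by omega
  have h2 : (b + 1).toNat = b.toNat + 1 := by omega
  simp [h1, h2]

lemma slice_zero_cons (x : Int) (xs : List Int) (b : Int) (hb : 1 ≤ b) :
    PySem.List.slice (x :: xs) (some 0) (some b) = x :: PySem.List.slice xs (some 0) (some (b - 1)) := by
  rw [PySem.List.slice_toNat _ (by omega) (by omega), PySem.List.slice_toNat _ (by omega) (by omega)]
  have h1 : b.toNat = (b - 1).toNat + 1 := by omega
  rw [h1]
  simp

-- shifting every boundary by one drops the head element from every slice target
lemma slices_shift (x : Int) (xs : List Int) (bs : List Int) (h : ∀ b ∈ bs, 0 ≤ b) :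
    ((bs.map (· + 1)).zip ((bs.map (· + 1)).tail)).map
        (fun p => PySem.List.slice (x :: xs) (some p.1) (some p.2)) =
      (bs.zip bs.tail).map (fun p => PySem.List.slice xs (some p.1) (some p.2)) := by
  rw [← List.map_tail, List.zip_map, List.map_map]
  refine List.map_congr_left ?_
  rintro ⟨a, b⟩ hp
  obtain ⟨h1, h2⟩ := List.of_mem_zip hp
  exact slice_cons_shift x xs a b (h _ h1) (h _ (List.mem_of_mem_tail h2))

-- the cut positions of (x :: y :: ys) are: 1 (iff the first gap is large), then the cuts of (y :: ys) shifted
lemma cuts_shift (md x y : Int) (ys : List Int) :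
    cutsB md (x :: y :: ys) =
      (if md < y - x then [(1 : Int)] else []) ++ (cutsB md (y :: ys)).map (· + 1) := by
  unfold cutsB
  have hlen : ((x :: y :: ys).length : Int) = ((y :: ys).length : Int) + 1 := by
    simp
  have h11 : (1 : Int) < ((y :: ys).length : Int) + 1 := by
    have hlp : 1 ≤ (y :: ys).length := by simp
    omega
  rw [hlen, PySem.List.pyRange_one_cons h11]
  have hrange : PySem.List.pyRange (1 + 1) (((y :: ys).length : Int) + 1) 1 =
      (PySem.List.pyRange 1 ((y :: ys).length : Int) 1).map (· + 1) := by
    rw [PySem.List.pyRange_one, PySem.List.pyRange_one, List.map_map]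
    have : (((y :: ys).length : Int) + 1 - (1 + 1)) = (((y :: ys).length : Int) - 1) := by ring
    rw [this]
    refine List.map_congr_left ?_
    intro k _
    simp only [Function.comp_apply]
    push_cast
    ring
  rw [List.filter_cons, hrange, List.filter_map]
  have hcond1 : (decide (md < (PySem.List.pyGet? (x :: y :: ys) 1).getD 0 -
      (PySem.List.pyGet? (x :: y :: ys) (1 - 1)).getD 0)) = decide (md < y - x) := by
    have e1 : PySem.List.pyGet? (x :: y :: ys) 1 = some y := by
      rw [show ((1:Int)) = ((0:Int) + 1) by ring, pyGet?_cons_shift x (y :: ys) 0 le_rfl]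
      exact PySem.List.pyGet?_zero_cons y ys
    have e0 : PySem.List.pyGet? (x :: y :: ys) (1 - 1) = some x := by
      norm_num
    rw [e1, e0]
    simp
  have hfilter : ∀ i ∈ PySem.List.pyRange 1 ((y :: ys).length : Int) 1,
      ((fun j => decide (md < (PySem.List.pyGet? (x :: y :: ys) j).getD 0 -
          (PySem.List.pyGet? (x :: y :: ys) (j - 1)).getD 0)) ∘ (· + 1)) i =
        (fun j => decide (md < (PySem.List.pyGet? (y :: ys) j).getD 0 -
          (PySem.List.pyGet? (y :: ys) (j - 1)).getD 0)) i := by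
    intro i hi
    have hi1 : 1 ≤ i := (PySem.List.mem_pyRange_one.mp hi).1
    simp only [Function.comp]
    rw [pyGet?_cons_shift x (y :: ys) i (by omega)]
    have : i + 1 - 1 = (i - 1) + 1 := by ring
    rw [this, pyGet?_cons_shift x (y :: ys) (i - 1) (by omega)]
  rw [List.filter_congr hfilter, hcond1]
  by_cases hc : md < y - x
  · simp [hc]
  · simp [hc]

-- every cut position and the length bound are at least 1
lemma cuts_bounds_pos (md : Int) (l : List Int) (b : Int)
    (hb : b ∈ cutsB md l ++ [(l.length : Int)]) (hl : l ≠ []) : 1 ≤ b := by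
  rcases List.mem_append.mp hb with h | h
  · unfold cutsB at h
    have h2 := List.mem_filter.mp h
    exact (PySem.List.mem_pyRange_one.mp h2.1).1
  · have : b = (l.length : Int) := by simpa using h
    subst this
    have : 0 < l.length := List.length_pos_iff.mpr hl
    omega

-- the boundaries-then-slice construction computes the reference foldr grouping
lemma slicesOf_eq (md : Int) : ∀ (xs : List Int) (x : Int),
    slicesOf md (x :: xs) = (x :: xs).foldr (fun a g => altStep md g a) [] := by
  intro xs
  induction xs with
  | nil =>
      intro x
      simp [slicesOf, cutsB, altStep, PySem.List.pyRange_one_eq_nil,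
        PySem.List.slice_toNat]
  | cons y ys ih =>
      intro x
      have hB : ∀ b ∈ cutsB md (y :: ys) ++ [((y :: ys).length : Int)], 0 ≤ b := by
        intro b hb
        have := cuts_bounds_pos md (y :: ys) b hb (by simp)
        omega
      have hlen : ((x :: y :: ys).length : Int) = ((y :: ys).length : Int) + 1 := by
        simp
      obtain ⟨t', gs', h'⟩ := foldrB_cons md y ys
      have ihy := ih y
      rw [List.foldr_cons, ← ihy]
      by_cases hc : md < y - x
      · -- new group: bounds are 0 :: 1 :: (shifted old bounds)
        have hB0 : ∀ b ∈ (0 : Int) :: (cutsB md (y :: ys) ++ [((y :: ys).length : Int)]), 0 ≤ b := by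
          intro b hb
          rcases List.mem_cons.mp hb with h | h
          · omega
          · exact hB b h
        have hbs : (0 : Int) :: cutsB md (x :: y :: ys) ++ [((x :: y :: ys).length : Int)] =
            0 :: ((0 : Int) :: (cutsB md (y :: ys) ++ [((y :: ys).length : Int)])).map (· + 1) := by
          rw [cuts_shift md x y ys, if_pos hc, hlen]
          simp
        have hsh := slices_shift x (y :: ys)
          ((0 : Int) :: (cutsB md (y :: ys) ++ [((y :: ys).length : Int)])) hB0
        simp only [List.map_cons, List.tail_cons] at hsh
        rw [slicesOf, hbs]
        simp only [List.map_cons, List.tail_cons, List.zip_cons_cons, List.map]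
        rw [hsh]
        have hfirst : PySem.List.slice (x :: y :: ys) (some 0) (some (0 + 1)) = [x] := by
          rw [PySem.List.slice_toNat _ (by omega) (by omega)]
          simp
        rw [hfirst]
        have hne : ¬ ((y : Int) - x ≤ md) := by omega
        have hres : altStep md ((y :: ys).foldr (fun a g => altStep md g a) []) x =
            [x] :: (y :: ys).foldr (fun a g => altStep md g a) [] := by
          rw [h', altStep]
          simp [hne]
        have hM : List.map (fun p => PySem.List.slice (y :: ys) (some p.1) (some p.2))
            ((0 :: (cutsB md (y :: ys) ++ [((y :: ys).length : Int)])).zip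
              (cutsB md (y :: ys) ++ [((y :: ys).length : Int)])) = slicesOf md (y :: ys) := by
          rw [slicesOf]
          simp only [List.cons_append, List.tail_cons]
        rw [hM, ihy, hres]
      · -- extend first group: bounds are 0 :: (shifted old bounds)
        rcases hC : cutsB md (y :: ys) ++ [((y :: ys).length : Int)] with _ | ⟨c, rest⟩
        · simp at hC
        · have hc1 : 1 ≤ c := cuts_bounds_pos md (y :: ys) c (by rw [hC]; simp) (by simp)
          have hpos : ∀ b ∈ (c :: rest), 0 ≤ b := by
            intro b hb
            have hmem : b ∈ cutsB md (y :: ys) ++ [((y :: ys).length : Int)] := by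
              rw [hC]; exact hb
            have := cuts_bounds_pos md (y :: ys) b hmem (by simp)
            omega
          have hbs : (0 : Int) :: cutsB md (x :: y :: ys) ++ [((x :: y :: ys).length : Int)] =
              0 :: ((c :: rest).map (· + 1)) := by
            rw [cuts_shift md x y ys, if_neg hc, hlen, ← hC]
            simp
          have hsh := slices_shift x (y :: ys) (c :: rest) hpos
          simp only [List.map_cons, List.tail_cons] at hsh
          rw [slicesOf, hbs]
          simp only [List.map_cons, List.tail_cons, List.zip_cons_cons, List.map]
          rw [hsh]
          have hfirst : PySem.List.slice (x :: y :: ys) (some 0) (some (c + 1)) =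
              x :: PySem.List.slice (y :: ys) (some 0) (some c) := by
            have := slice_zero_cons x (y :: ys) (c + 1) (by omega)
            simpa using this
          rw [hfirst]
          have hold : slicesOf md (y :: ys) =
              PySem.List.slice (y :: ys) (some 0) (some c) ::
                ((c :: rest).zip rest).map
                  (fun p => PySem.List.slice (y :: ys) (some p.1) (some p.2)) := by
            rw [slicesOf]
            simp only [List.cons_append, List.tail_cons]
            rw [hC]
            simp only [List.zip_cons_cons, List.map_cons]
          have hold2 : PySem.List.slice (y :: ys) (some 0) (some c) ::
              ((c :: rest).zip rest).map
                (fun p => PySem.List.slice (y :: ys) (some p.1) (some p.2)) =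
              (y :: t') :: gs' := by
            rw [← hold, ihy, h']
          injection hold2 with hy1 hy2
          rw [hy1, hy2, ihy, h', altStep]
          have hle : (y : Int) - x ≤ md := by omega
          simp [hle]

-- ===== VERDICT (by name: the statement is the Claim_ definition above) =====
theorem group_nearby_indices_py_spec : Claim_equal_group_nearby_indices_py := by
  intro indices max_distance _
  unfold Spec_group_nearby_indices_py
  by_cases hnil : indices = []
  · subst hnil
    simp [group_nearby_indices_py, group_nearby_indices_py_alt]
  · have hslen : (PySem.List.sorted indices (fun x => x) false).length = indices.length :=
      PySem.List.length_sorted ..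
    rcases hs : PySem.List.sorted indices (fun x => x) false with _ | ⟨x, xs⟩
    · exact absurd (by simpa [hs] using hslen.symm) (by simpa using hnil)
    · rw [group_nearby_indices_py_alt, if_neg hnil, hs]
      show group_nearby_indices_py indices max_distance =
        List.map (fun p => PySem.List.slice (x :: xs) (some p.1) (some p.2))
          ((([(0:Int)] ++ cutsB max_distance (x :: xs) ++ [((x :: xs).length : Int)]).zip
            (PySem.List.slice ([(0:Int)] ++ cutsB max_distance (x :: xs) ++ [((x :: xs).length : Int)]) (some 1) none)))
      have halt : ([(0:Int)] ++ cutsB max_distance (x :: xs) ++ [((x :: xs).length : Int)]).zip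
            (PySem.List.slice ([(0:Int)] ++ cutsB max_distance (x :: xs) ++ [((x :: xs).length : Int)]) (some 1) none) =
          ((0 : Int) :: cutsB max_distance (x :: xs) ++ [((x :: xs).length : Int)]).zip
            (((0 : Int) :: cutsB max_distance (x :: xs) ++ [((x :: xs).length : Int)]).tail) := by
        rw [PySem.List.slice_from_one]
        simp
      rw [halt]
      have hB := slicesOf_eq max_distance xs x
      rw [slicesOf] at hB
      rw [hB]
      rw [group_nearby_indices_py, if_neg hnil, hs]
      simp only [PySem.List.pyGet?_zero_cons, PySem.List.slice_from_one, Option.getD_some,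
        List.tail_cons]
      have h0 : ([] : List Int) ++ [x] = [x] := rfl
      rw [← h0, loop_eq max_distance xs [] [] x]
      obtain ⟨t', gs', h'⟩ := foldrB_cons max_distance x xs
      rw [h']
      simp
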